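-- pv_equiv track=rewrite | github.com/mbhat24/teloscopy | src/teloscopy/genomics/stela.py | _chromosome_arms_for_sex
-- ===== SOURCE A (Python) =====
-- _CHROMOSOME_ARM_RELATIVE_LENGTHS: dict[str, float] = {
--     "1p": 0.92, "1q": 0.97,
--     "2p": 0.94, "2q": 0.98,
--     "3p": 0.96, "3q": 1.01,
--     "4p": 0.95, "4q": 1.00,
--     "5p": 0.97, "5q": 1.02,
--     "6p": 0.98, "6q": 1.01,
--     "7p": 0.96, "7q": 1.00,
--     "8p": 0.95, "8q": 1.01,
--     "9p": 0.97, "9q": 1.02,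
--     "10p": 0.96, "10q": 1.01,
--     "11p": 0.97, "11q": 1.00,
--     "12p": 0.98, "12q": 1.02,
--     "13p": 0.99, "13q": 1.03,
--     "14p": 0.98, "14q": 1.02,
--     "15p": 0.97, "15q": 1.01,
--     "16p": 0.93, "16q": 0.99,
--     "17p": 0.88, "17q": 0.96,   # 17p is consistently shortest
--     "18p": 0.95, "18q": 1.01,
--     "19p": 0.94, "19q": 0.99,
--     "20p": 0.98, "20q": 1.03,
--     "21p": 0.99, "21q": 1.04,
--     "22p": 0.97, "22q": 1.02,
--     "Xp": 1.02, "Xq": 1.05,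
--     "Yp": 0.90, "Yq": 0.95,
-- }
--
-- def _chromosome_arms_for_sex(sex: str) -> list[str]:
--     """Return the list of chromosome arms appropriate for the given sex."""
--     arms = [
--         arm for arm in _CHROMOSOME_ARM_RELATIVE_LENGTHS
--         if arm not in ("Yp", "Yq")
--     ]
--     if sex.lower().strip() == "male":
--         arms.extend(["Yp", "Yq"])
--     return sorted(arms, key=_arm_sort_key)
--
-- def _arm_sort_key(arm: str) -> tuple[int, int]:
--     """Sort key: numeric chromosome first, then p=0 / q=1.
--
--     Non-numeric chromosomes (X, Y) sort after autosomes.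
--     """
--     chrom = arm[:-1]
--     suffix = 0 if arm[-1] == "p" else 1
--     try:
--         return (int(chrom), suffix)
--     except ValueError:
--         order = {"X": 23, "Y": 24}
--         return (order.get(chrom, 25), suffix)
-- ===== SOURCE B (Python) =====
-- def _chromosome_arms_for_sex(sex: str) -> list[str]:
--     """Build the arms directly in sorted order: 1..22 (p then q), then X, then Y for males."""
--     arms = []
--     for n in range(1, 23):
--         arms.append(f"{n}p")
--         arms.append(f"{n}q")
--     arms.append("Xp")
--     arms.append("Xq")
--     if sex.lower().strip() == "male":
--         arms.append("Yp")
--         arms.append("Yq")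
--     return arms
-- ===== Notes on version B (the rewrite author's own statement) =====
-- stated objective: simpler
-- what changed: B generates the arms directly in final sorted order (loop 1..22 emitting p/q, then X, then Y for males), eliminating A's filter-over-dict-keys pass and the sorted() call with its _arm_sort_key helper.
import Mathlib
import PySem

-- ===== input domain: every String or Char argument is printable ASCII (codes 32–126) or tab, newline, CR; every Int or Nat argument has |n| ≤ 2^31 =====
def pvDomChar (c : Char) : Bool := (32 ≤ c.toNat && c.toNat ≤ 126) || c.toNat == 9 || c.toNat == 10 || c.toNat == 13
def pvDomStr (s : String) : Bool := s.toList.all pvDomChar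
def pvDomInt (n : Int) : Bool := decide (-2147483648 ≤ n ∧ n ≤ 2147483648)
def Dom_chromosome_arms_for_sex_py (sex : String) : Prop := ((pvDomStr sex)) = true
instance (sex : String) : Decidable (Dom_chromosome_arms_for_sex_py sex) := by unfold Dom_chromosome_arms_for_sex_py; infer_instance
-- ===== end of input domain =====

-- B builds the arm list directly in final sorted order, dropping A's filter pass and keyed sort (objective: simpler).

-- ===== PORT A =====
-- Keys of _CHROMOSOME_ARM_RELATIVE_LENGTHS in insertion order (A iterates only the keys;
-- the float values are never used, so only the key list is ported).
def pvArmKeys : List String :=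
  ["1p", "1q", "2p", "2q", "3p", "3q", "4p", "4q", "5p", "5q", "6p", "6q",
   "7p", "7q", "8p", "8q", "9p", "9q", "10p", "10q", "11p", "11q", "12p", "12q",
   "13p", "13q", "14p", "14q", "15p", "15q", "16p", "16q", "17p", "17q",
   "18p", "18q", "19p", "19q", "20p", "20q", "21p", "21q", "22p", "22q",
   "Xp", "Xq", "Yp", "Yq"]

-- _arm_sort_key; A only ever applies it to the nonempty literal arms above, where it is exact.
def pvArmSortKey (arm : String) : Int × Int :=
  let chrom := PySem.Str.slice arm none (some (-1))
  let suffix : Int := if PySem.Str.pyGet? arm (-1) = some 'p' then 0 else 1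
  match PySem.Int.ofStr? chrom with
  | some n => (n, suffix)
  | none => ((PySem.Dict.mk [("X", (23 : Int)), ("Y", 24)]).getD chrom 25, suffix)

def chromosome_arms_for_sex_py (sex : String) : List String :=
  let arms := pvArmKeys.filter (fun arm => !(arm == "Yp" || arm == "Yq"))
  let arms :=
    if PySem.Str.strip (PySem.Str.lower sex) = "male" then arms ++ ["Yp", "Yq"] else arms
  PySem.List.sorted2 arms (fun a => (pvArmSortKey a).1) (fun a => (pvArmSortKey a).2)

-- ===== PORT B =====
def chromosome_arms_for_sex_py_alt (sex : String) : List String :=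
  let arms := (PySem.List.pyRange 1 23 1).foldl
    (fun acc n => acc ++ [PySem.Int.toStr n ++ "p"] ++ [PySem.Int.toStr n ++ "q"]) []
  let arms := arms ++ ["Xp"] ++ ["Xq"]
  if PySem.Str.strip (PySem.Str.lower sex) = "male" then arms ++ ["Yp"] ++ ["Yq"] else arms

-- ===== PRECONDITION & SPEC =====
def Spec_chromosome_arms_for_sex_py (sex : String) (out : List String) : Prop := out = chromosome_arms_for_sex_py_alt sex
instance (sex : String) (out : List String) : Decidable (Spec_chromosome_arms_for_sex_py sex out) := by unfold Spec_chromosome_arms_for_sex_py; infer_instance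

-- ===== CLAIM (what is proved, stated in full; the proofs are below) =====
def Claim_equal_chromosome_arms_for_sex_py : Prop := ∀ (sex : String), Dom_chromosome_arms_for_sex_py sex → Spec_chromosome_arms_for_sex_py sex (chromosome_arms_for_sex_py sex)

-- ===== LEMMAS AND PROOFS =====

-- ===== VERDICT (by name: the statement is the Claim_ definition above) =====
theorem chromosome_arms_for_sex_py_spec : Claim_equal_chromosome_arms_for_sex_py := by
  intro sex _
  unfold Spec_chromosome_arms_for_sex_py chromosome_arms_for_sex_py chromosome_arms_for_sex_py_alt
  by_cases h : PySem.Str.strip (PySem.Str.lower sex) = "male" <;>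
    simp only [h, if_true, if_false] <;> decide
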